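-- pv_equiv track=rewrite | github.com/wongmrdev/pr-dot-ai | prdotai.py | find_nth_closest_newline_before
-- ===== SOURCE A (Python) =====
-- def find_nth_closest_newline_before(string, index, n):
--     newline_count = 0
--     for i in range(index, -1, -1):
--         if string[i] == "\n":
--             newline_count += 1
--             if newline_count == n:
--                 return i
--     return -1  # No nth newline found before the given index
-- ===== SOURCE B (Python) =====
-- def find_nth_closest_newline_before(string, index, n):
--     positions = [i for i in range(index + 1) if string[i] == "\n"]
--     if n >= 1 and len(positions) >= n:
--         return positions[-n]
--     return -1
-- ===== Notes on version B (the rewrite author's own statement) =====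
-- stated objective: alternative
-- what changed: Replaces the backward counting loop with early return by a forward pass that builds the list of newline positions at or before index and then selects the nth-from-the-end by negative indexing.
import Mathlib
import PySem

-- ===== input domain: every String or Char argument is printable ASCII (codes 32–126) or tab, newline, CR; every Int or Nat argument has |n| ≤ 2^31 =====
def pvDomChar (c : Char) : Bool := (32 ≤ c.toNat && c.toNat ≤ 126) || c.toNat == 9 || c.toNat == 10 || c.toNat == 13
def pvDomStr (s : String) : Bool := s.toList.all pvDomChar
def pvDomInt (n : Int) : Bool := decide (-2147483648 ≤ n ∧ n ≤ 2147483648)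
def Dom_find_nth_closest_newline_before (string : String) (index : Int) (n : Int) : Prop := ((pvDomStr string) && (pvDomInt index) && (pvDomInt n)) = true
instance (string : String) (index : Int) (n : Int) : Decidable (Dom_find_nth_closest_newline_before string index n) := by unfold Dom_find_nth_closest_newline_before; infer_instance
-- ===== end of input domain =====

-- B replaces A's backward counting loop by a forward newline-position table then negative indexing (alternative decomposition, same cost).


-- ===== PORT A =====
-- A's loop: for i in range(index, -1, -1): count newlines, return i on the nth.
-- `none` from pyGet? is Python's IndexError (excluded by Pre_); -2 there is arbitrary.
def pvALoop (cs : List Char) (idxs : List Int) (cnt : Int) (n : Int) : Int :=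
  match idxs with
  | [] => -1
  | i :: rest =>
    match PySem.List.pyGet? cs i with
    | none => -2
    | some c =>
      if c = '\n' then
        if cnt + 1 = n then i else pvALoop cs rest (cnt + 1) n
      else pvALoop cs rest cnt n

def find_nth_closest_newline_before (string : String) (index : Int) (n : Int) : Int :=
  pvALoop string.toList (PySem.List.pyRange index (-1) (-1)) 0 n

-- ===== PORT B =====
-- positions = [i for i in range(index+1) if string[i] == "\n"]; positions[-n] under the guard.
-- pyGetD's default -1 is never read: the guard puts -n in range (Python's positions[-n]).
def find_nth_closest_newline_before_alt (string : String) (index : Int) (n : Int) : Int :=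
  let positions := (PySem.List.pyRange 0 (index + 1) 1).filter
      (fun i => PySem.List.pyGetD string.toList i ' ' = '\n')
  if 1 ≤ n ∧ n ≤ (positions.length : Int) then PySem.List.pyGetD positions (-n) (-1) else -1

-- ===== PRECONDITION & SPEC =====
-- Python A (and B) raise IndexError exactly when index ≥ len(string): string[index] is the first access.
def Pre_find_nth_closest_newline_before (string : String) (index : Int) (n : Int) : Prop :=
  index < PySem.Str.len string
instance (string : String) (index : Int) (n : Int) : Decidable (Pre_find_nth_closest_newline_before string index n) := by unfold Pre_find_nth_closest_newline_before; infer_instance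

def pvWitness_find_nth_closest_newline_before : String × Int × Int := ("a\nb\nc", 4, 2)

def Spec_find_nth_closest_newline_before (string : String) (index : Int) (n : Int) (out : Int) : Prop := out = find_nth_closest_newline_before_alt string index n
instance (string : String) (index : Int) (n : Int) (out : Int) : Decidable (Spec_find_nth_closest_newline_before string index n out) := by unfold Spec_find_nth_closest_newline_before; infer_instance

-- ===== CLAIM (what is proved, stated in full; the proofs are below) =====
def Claim_equal_find_nth_closest_newline_before : Prop := ∀ (string : String) (index : Int) (n : Int), Dom_find_nth_closest_newline_before string index n → Pre_find_nth_closest_newline_before string index n → Spec_find_nth_closest_newline_before string index n (find_nth_closest_newline_before string index n)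

-- ===== LEMMAS AND PROOFS =====

-- the value both programs compute: the m-th element (1-based) of a list of candidate positions
def pvPick (F : List Int) (m : Int) : Int :=
  if 1 ≤ m ∧ m ≤ (F.length : Int) then F.getD (m - 1).toNat (-1) else -1

lemma pvPick_one (x : Int) (F : List Int) : pvPick (x :: F) 1 = x := by
  unfold pvPick
  rw [if_pos ⟨by norm_num, by rw [List.length_cons]; push_cast; omega⟩]
  simp

lemma pvPick_cons (x : Int) (F : List Int) (m : Int) (hm : m ≠ 1) :
    pvPick (x :: F) m = pvPick F (m - 1) := by
  unfold pvPick
  by_cases h : 1 ≤ m - 1 ∧ m - 1 ≤ (F.length : Int)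
  · rw [if_pos (by rw [List.length_cons]; push_cast; omega), if_pos h]
    have h2 : (m - 1).toNat = (m - 1 - 1).toNat + 1 := by omega
    rw [h2, List.getD_cons_succ]
  · rw [if_neg (by rw [List.length_cons]; push_cast at h ⊢; omega), if_neg h]

lemma pvALoop_eq (cs : List Char) (M : List Int) :
    ∀ (cnt n : Int), (∀ i ∈ M, 0 ≤ i ∧ i < (cs.length : Int)) →
    pvALoop cs M cnt n =
      pvPick (M.filter (fun i => PySem.List.pyGetD cs i ' ' = '\n')) (n - cnt) := by
  induction M with
  | nil =>
    intro cnt n _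
    simp [pvALoop, pvPick]
  | cons i rest ih =>
    intro cnt n h
    obtain ⟨h0, h1⟩ := h i (by simp)
    have hget : PySem.List.pyGet? cs i = some (PySem.List.pyGetD cs i ' ') := by
      rw [PySem.List.pyGetD_eq_getElem cs ' ' h0 h1,
        PySem.List.pyGet?_eq_some_getElem cs h0 h1]
    have hrest : ∀ j ∈ rest, 0 ≤ j ∧ j < (cs.length : Int) := fun j hj => h j (by simp [hj])
    by_cases hp : PySem.List.pyGetD cs i ' ' = '\n'
    · have hfil : (i :: rest).filter (fun i => PySem.List.pyGetD cs i ' ' = '\n')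
          = i :: rest.filter (fun i => PySem.List.pyGetD cs i ' ' = '\n') := by
        simp [hp]
      by_cases hn : cnt + 1 = n
      · have hL : pvALoop cs (i :: rest) cnt n = i := by
          simp [pvALoop, hget, hp, hn]
        rw [hL, hfil, show n - cnt = 1 by omega, pvPick_one]
      · have hL : pvALoop cs (i :: rest) cnt n = pvALoop cs rest (cnt + 1) n := by
          simp [pvALoop, hget, hp, hn]
        rw [hL, ih (cnt + 1) n hrest, hfil, pvPick_cons i _ (n - cnt) (by omega)]
        congr 1
        omega
    · have hfil : (i :: rest).filter (fun i => PySem.List.pyGetD cs i ' ' = '\n')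
          = rest.filter (fun i => PySem.List.pyGetD cs i ' ' = '\n') := by
        simp [hp]
      have hL : pvALoop cs (i :: rest) cnt n = pvALoop cs rest cnt n := by
        simp [pvALoop, hget, hp]
      rw [hL, ih cnt n hrest, hfil]

lemma pvPick_reverse (F : List Int) (n : Int) (h : 1 ≤ n ∧ n ≤ (F.length : Int)) :
    pvPick F.reverse n = F.getD (F.length - n.toNat) (-1) := by
  unfold pvPick
  rw [if_pos (by simpa using h)]
  have h1 : (n - 1).toNat < F.length := by omega
  rw [List.getD_eq_getElem _ _ (by simpa using h1)]
  rw [List.getElem_reverse]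
  rw [List.getD_eq_getElem _ _ (by omega)]
  congr 1
  omega

-- ===== VERDICT (by name: the statement is the Claim_ definition above) =====
theorem find_nth_closest_newline_before_spec : Claim_equal_find_nth_closest_newline_before := by
  intro s index n _ hpre
  unfold Spec_find_nth_closest_newline_before find_nth_closest_newline_before find_nth_closest_newline_before_alt
  have hlen : PySem.Str.len s = (s.toList.length : Int) := by simp [PySem.Str.len_eq]
  have hrev : PySem.List.pyRange index (-1) (-1) = (PySem.List.pyRange 0 (index + 1) 1).reverse := by
    have := PySem.List.pyRange_neg_one_eq_reverse index (-1)
    simpa using this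
  have hmem : ∀ i ∈ (PySem.List.pyRange 0 (index + 1) 1).reverse,
      0 ≤ i ∧ i < (s.toList.length : Int) := by
    intro i hi
    rw [List.mem_reverse, PySem.List.mem_pyRange_one] at hi
    unfold Pre_find_nth_closest_newline_before at hpre
    rw [hlen] at hpre
    omega
  rw [hrev, pvALoop_eq s.toList _ 0 n hmem, List.filter_reverse]
  set F := (PySem.List.pyRange 0 (index + 1) 1).filter
      (fun i => decide (PySem.List.pyGetD s.toList i ' ' = '\n')) with hF
  show pvPick F.reverse (n - 0) = _
  by_cases h : 1 ≤ n ∧ n ≤ (F.length : Int)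
  · rw [if_pos h]
    have hsub : n - 0 = n := by omega
    rw [hsub, pvPick_reverse F n h]
    have hn : -n = -((n.toNat : Int)) := by omega
    rw [hn, PySem.List.pyGetD_neg_natCast F n.toNat (-1) (by omega) (by omega)]
    rw [List.getD_eq_getElem _ _ (by omega)]
  · rw [if_neg h]
    unfold pvPick
    rw [if_neg (by simpa using h)]
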